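-- pv_equiv track=rewrite | github.com/kpiyush16/learning_sequence_encoders | utils.py | argwhereHead
-- ===== SOURCE A (Python) =====
-- def argwhereHead(head, tail, rel, array, tripleDict):
-- 	wrongAnswer = 0
-- 	for num in array:
-- 		if num == head:
-- 			return wrongAnswer
-- 		elif (num, tail, rel[0]) in tripleDict:
-- 			continue
-- 		else:
-- 			wrongAnswer += 1
-- 	return wrongAnswer
-- ===== SOURCE B (Python) =====
-- def argwhereHead(head, tail, rel, array, tripleDict):
-- 	try:
-- 		pos = array.index(head)
-- 	except ValueError:
-- 		pos = len(array)
-- 	return sum(1 for num in array[:pos] if (num, tail, rel[0]) not in tripleDict)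
-- ===== Notes on version B (the rewrite author's own statement) =====
-- stated objective: simpler
-- what changed: Replaces A's single interleaved early-exit counting loop by a two-phase locate-then-count: first find the cut-off position of head via list.index (len(array) if absent), then count the non-dict-member entries of the slice before it with a sum over a comprehension.
import Mathlib
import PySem

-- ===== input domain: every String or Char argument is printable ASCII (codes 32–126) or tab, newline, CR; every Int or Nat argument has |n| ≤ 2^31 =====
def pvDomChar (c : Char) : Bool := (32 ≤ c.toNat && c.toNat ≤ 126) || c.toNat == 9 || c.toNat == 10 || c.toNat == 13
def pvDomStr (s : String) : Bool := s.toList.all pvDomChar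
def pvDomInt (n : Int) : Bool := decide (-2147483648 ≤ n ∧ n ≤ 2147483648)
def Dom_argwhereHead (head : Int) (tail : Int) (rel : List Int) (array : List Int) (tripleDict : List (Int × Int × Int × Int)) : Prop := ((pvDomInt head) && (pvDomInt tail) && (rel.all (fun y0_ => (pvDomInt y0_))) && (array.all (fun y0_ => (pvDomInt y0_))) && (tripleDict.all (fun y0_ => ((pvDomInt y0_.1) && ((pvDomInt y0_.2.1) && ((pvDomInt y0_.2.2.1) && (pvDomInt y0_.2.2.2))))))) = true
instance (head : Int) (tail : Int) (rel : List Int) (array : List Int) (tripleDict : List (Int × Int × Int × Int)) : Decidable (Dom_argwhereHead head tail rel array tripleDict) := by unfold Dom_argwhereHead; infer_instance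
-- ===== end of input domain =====

-- B replaces A's interleaved early-exit counting loop by a locate-then-count two-phase
-- computation (find the index of head, then count non-dict-member entries of the prefix): simpler decomposition, same cost.


-- ===== PORT A =====
-- '(num, tail, rel[0]) in tripleDict': membership among the dict's keys (first three components of each entry)
def tripleKeyMem (tripleDict : List (Int × Int × Int × Int)) (k : Int × Int × Int) : Bool :=
  tripleDict.any (fun e => (e.1, e.2.1, e.2.2.1) == k)

-- the for-loop of A with its early return; rel[0] is PySem.List.pyGet? rel 0 (none = IndexError,
-- excluded by Pre_; the .getD 0 default is only reached outside Pre_)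
def argwhereGo (head : Int) (tail : Int) (rel : List Int) (tripleDict : List (Int × Int × Int × Int)) : List Int → Int → Int
  | [], wrongAnswer => wrongAnswer
  | num :: rest, wrongAnswer =>
    if num == head then wrongAnswer
    else if tripleKeyMem tripleDict (num, tail, (PySem.List.pyGet? rel 0).getD 0) then
      argwhereGo head tail rel tripleDict rest wrongAnswer
    else
      argwhereGo head tail rel tripleDict rest (wrongAnswer + 1)

def argwhereHead (head : Int) (tail : Int) (rel : List Int) (array : List Int) (tripleDict : List (Int × Int × Int × Int)) : Int :=
  argwhereGo head tail rel tripleDict array 0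

-- ===== PORT B =====
def argwhereHead_alt (head : Int) (tail : Int) (rel : List Int) (array : List Int) (tripleDict : List (Int × Int × Int × Int)) : Int :=
  let pos : Int :=
    match PySem.List.index? array head with   -- array.index(head), guarded by try/except
    | some i => (i : Int)
    | none => (array.length : Int)
  ((PySem.List.slice array none (some pos)).filter
     (fun num => !(tripleKeyMem tripleDict (num, tail, (PySem.List.pyGet? rel 0).getD 0)))).length

-- ===== PRECONDITION & SPEC =====
-- Pre_ excludes exactly the inputs on which Python A raises IndexError: rel empty while the
-- loop reaches the elif, i.e. some element strictly before the first occurrence of head.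
def Pre_argwhereHead (head : Int) (_tail : Int) (rel : List Int) (array : List Int) (_tripleDict : List (Int × Int × Int × Int)) : Prop :=
  rel ≠ [] ∨ array.takeWhile (fun n => n != head) = []
instance (head : Int) (tail : Int) (rel : List Int) (array : List Int) (tripleDict : List (Int × Int × Int × Int)) : Decidable (Pre_argwhereHead head tail rel array tripleDict) := by unfold Pre_argwhereHead; infer_instance

def pvWitness_argwhereHead : Int × Int × List Int × List Int × (List (Int × Int × Int × Int)) :=
  (2, 5, [7], [1, 2, 3], [(1, 5, 7, 9)])

def Spec_argwhereHead (head : Int) (tail : Int) (rel : List Int) (array : List Int) (tripleDict : List (Int × Int × Int × Int)) (out : Int) : Prop := out = argwhereHead_alt head tail rel array tripleDict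
instance (head : Int) (tail : Int) (rel : List Int) (array : List Int) (tripleDict : List (Int × Int × Int × Int)) (out : Int) : Decidable (Spec_argwhereHead head tail rel array tripleDict out) := by unfold Spec_argwhereHead; infer_instance

-- ===== CLAIM (what is proved, stated in full; the proofs are below) =====
def Claim_equal_argwhereHead : Prop := ∀ (head : Int) (tail : Int) (rel : List Int) (array : List Int) (tripleDict : List (Int × Int × Int × Int)), Dom_argwhereHead head tail rel array tripleDict → Pre_argwhereHead head tail rel array tripleDict → Spec_argwhereHead head tail rel array tripleDict (argwhereHead head tail rel array tripleDict)

-- ===== LEMMAS AND PROOFS =====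

-- B's slice-up-to-pos is the prefix of array before the first occurrence of head
theorem slice_pos_eq_takeWhile (head : Int) (array : List Int) :
    PySem.List.slice array none (some (match PySem.List.index? array head with
      | some i => (i : Int)
      | none => (array.length : Int))) = array.takeWhile (fun n => n != head) := by
  induction array with
  | nil => simp [PySem.List.slice]
  | cons x xs ih =>
    by_cases hx : x = head
    · subst hx
      rw [PySem.List.index?_cons_self]
      show PySem.List.slice (x :: xs) none (some ((0 : Nat) : Int)) = _
      rw [PySem.List.slice_to_natCast]
      simp
    · rw [PySem.List.index?_cons_of_ne xs hx]
      cases h : PySem.List.index? xs head with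
      | some i =>
        rw [h] at ih
        simp only [Option.map_some]
        show PySem.List.slice (x :: xs) none (some (((i + 1 : Nat)) : Int)) = _
        rw [PySem.List.slice_to_natCast]
        rw [PySem.List.slice_to_natCast] at ih
        simp [hx, List.take_succ_cons, ih]
      | none =>
        rw [h] at ih
        simp only [Option.map_none]
        show PySem.List.slice (x :: xs) none (some (((x :: xs).length : Nat) : Int)) = _
        rw [PySem.List.slice_to_natCast]
        rw [PySem.List.slice_to_natCast] at ih
        simp [hx, List.take_succ_cons, ih]

-- A's loop counts the filtered elements of that prefix
theorem argwhereGo_eq (head : Int) (tail : Int) (rel : List Int) (tripleDict : List (Int × Int × Int × Int)) :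
    ∀ (array : List Int) (acc : Int),
      argwhereGo head tail rel tripleDict array acc =
        acc + ((array.takeWhile (fun n => n != head)).filter
          (fun num => !(tripleKeyMem tripleDict (num, tail, (PySem.List.pyGet? rel 0).getD 0)))).length := by
  intro array
  induction array with
  | nil => intro acc; simp [argwhereGo]
  | cons x xs ih =>
    intro acc
    by_cases hx : x = head
    · subst hx; simp [argwhereGo]
    · by_cases hm : tripleKeyMem tripleDict (x, tail, (PySem.List.pyGet? rel 0).getD 0) = true
      · simp [argwhereGo, hx, hm, ih]
      · simp only [Bool.not_eq_true] at hm
        simp [argwhereGo, hx, hm, ih]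
        ring

-- ===== VERDICT (by name: the statement is the Claim_ definition above) =====
theorem argwhereHead_spec : Claim_equal_argwhereHead := by
  intro head tail rel array tripleDict _hDom _hPre
  unfold Spec_argwhereHead argwhereHead argwhereHead_alt
  simp only []
  rw [slice_pos_eq_takeWhile]
  rw [argwhereGo_eq]
  ring
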